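-- pv_equiv track=rewrite | github.com/Zongheng-Yu/python_practice | infinity_coding/pronto/solution.py | get_ping_pong_times
-- ===== SOURCE A (Python) =====
-- def get_ping_pong_times(transfer_path):
--     memory = []
--     times = 0
--     for each in transfer_path:
--         if each not in memory:
--             memory.append(each)
--         else:
--             times += 1
--     return times
-- ===== SOURCE B (Python) =====
-- def get_ping_pong_times(transfer_path):
--     seen = set()
--     total = 0
--     for each in transfer_path:
--         seen.add(each)
--         total += 1
--     return total - len(seen)
-- ===== Notes on version B (the rewrite author's own statement) =====
-- stated objective: faster
-- what changed: B counts repeats arithmetically as total minus number of distinct elements, maintaining a hash set in one pass instead of A's list-membership scan with a branch.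
import Mathlib
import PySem

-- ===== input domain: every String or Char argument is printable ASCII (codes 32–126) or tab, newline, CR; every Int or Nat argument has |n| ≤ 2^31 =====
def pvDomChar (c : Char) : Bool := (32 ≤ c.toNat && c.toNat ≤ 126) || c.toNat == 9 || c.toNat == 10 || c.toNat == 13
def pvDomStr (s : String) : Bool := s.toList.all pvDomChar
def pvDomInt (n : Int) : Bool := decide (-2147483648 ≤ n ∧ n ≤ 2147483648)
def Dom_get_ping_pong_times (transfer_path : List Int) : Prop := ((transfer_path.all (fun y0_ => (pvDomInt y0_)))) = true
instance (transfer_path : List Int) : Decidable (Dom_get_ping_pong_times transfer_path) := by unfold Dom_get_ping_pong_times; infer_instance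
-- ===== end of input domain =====

-- ===== PORT A =====
-- Header: B derives the repeat count as total minus distinct-count via a set, one pass, O(n) vs A's O(n^2) list scan.
def get_ping_pong_times (transfer_path : List Int) : Int :=
  (transfer_path.foldl
    (fun (st : List Int × Int) each =>
      if each ∉ st.1 then (st.1 ++ [each], st.2) else (st.1, st.2 + 1))
    ([], 0)).2

-- ===== PORT B =====
def get_ping_pong_times_alt (transfer_path : List Int) : Int :=
  let st := transfer_path.foldl
    (fun (st : PySem.Set Int × Int) each => (PySem.Set.add st.1 each, st.2 + 1))
    (PySem.Set.empty, 0)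
  st.2 - PySem.Set.len st.1

-- ===== PRECONDITION & SPEC =====
def Spec_get_ping_pong_times (transfer_path : List Int) (out : Int) : Prop := out = get_ping_pong_times_alt transfer_path
instance (transfer_path : List Int) (out : Int) : Decidable (Spec_get_ping_pong_times transfer_path out) := by unfold Spec_get_ping_pong_times; infer_instance

-- ===== CLAIM (what is proved, stated in full; the proofs are below) =====
def Claim_equal_get_ping_pong_times : Prop := ∀ (transfer_path : List Int), Dom_get_ping_pong_times transfer_path → Spec_get_ping_pong_times transfer_path (get_ping_pong_times transfer_path)

-- ===== LEMMAS AND PROOFS =====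

-- ===== VERDICT (by name: the statement is the Claim_ definition above) =====
-- Invariant: starting from the same memory list m and counters t (A) / c (B),
-- A's times equals B's total minus the growth of the memory, pointwise over the fold.
theorem ping_pong_invariant (l m : List Int) (t c : Int)
    (h : t = c - (m.length : Int)) :
    (l.foldl (fun (st : List Int × Int) each =>
        if each ∉ st.1 then (st.1 ++ [each], st.2) else (st.1, st.2 + 1)) (m, t)).2
      = (l.foldl (fun (st : PySem.Set Int × Int) each =>
          (PySem.Set.add st.1 each, st.2 + 1)) (m, c)).2
        - ((l.foldl (fun (st : PySem.Set Int × Int) each =>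
          (PySem.Set.add st.1 each, st.2 + 1)) (m, c)).1.length : Int) := by
  induction l generalizing m t c with
  | nil => simpa using h
  | cons x xs ih =>
    simp only [List.foldl_cons]
    by_cases hx : x ∈ m
    · rw [if_neg (by simp [hx]),
        show PySem.Set.add m x = m from by simp [PySem.Set.add, PySem.Set.contains, hx]]
      exact ih m (t + 1) (c + 1) (by omega)
    · rw [if_pos hx,
        show PySem.Set.add m x = m ++ [x] from by simp [PySem.Set.add, PySem.Set.contains, hx]]
      exact ih (m ++ [x]) t (c + 1) (by simp; omega)

theorem get_ping_pong_times_spec : Claim_equal_get_ping_pong_times := by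
  intro l _
  unfold Spec_get_ping_pong_times get_ping_pong_times get_ping_pong_times_alt
  simpa [PySem.Set.len, PySem.Set.empty] using ping_pong_invariant l [] 0 0 (by simp)
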